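-- pv_equiv track=rewrite | github.com/cwinkelmann/usde-innovations-applications-forest-it | webapp/app/user_labels.py | series_assigned_species
-- ===== SOURCE A (Python) =====
-- def series_assigned_species(
--     series_filenames: list[str], labels: dict[str, str]
-- ) -> str | None:
--     """Return the single user-assigned species if *all* images in the series
--     share it; otherwise None. Mixed labels within a series mean the user
--     hasn't made a consistent call, so the UI shows nothing."""
--     if not series_filenames:
--         return None
--     seen = {labels.get(fn) for fn in series_filenames}
--     seen.discard(None)
--     if len(seen) == 1:
--         return next(iter(seen))
--     return None
-- ===== SOURCE B (Python) =====
-- def series_assigned_species(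
--     series_filenames: list[str], labels: dict[str, str]
-- ) -> str | None:
--     result = None
--     for fn in series_filenames:
--         lbl = labels.get(fn)
--         if lbl is None:
--             continue
--         if result is None:
--             result = lbl
--         elif lbl != result:
--             return None
--     return result
-- ===== Notes on version B (the rewrite author's own statement) =====
-- stated objective: simpler
-- what changed: Replaces building a set of distinct looked-up labels and testing its cardinality with a single-pass candidate accumulator that returns None as soon as a second distinct label appears.
import Mathlib
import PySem

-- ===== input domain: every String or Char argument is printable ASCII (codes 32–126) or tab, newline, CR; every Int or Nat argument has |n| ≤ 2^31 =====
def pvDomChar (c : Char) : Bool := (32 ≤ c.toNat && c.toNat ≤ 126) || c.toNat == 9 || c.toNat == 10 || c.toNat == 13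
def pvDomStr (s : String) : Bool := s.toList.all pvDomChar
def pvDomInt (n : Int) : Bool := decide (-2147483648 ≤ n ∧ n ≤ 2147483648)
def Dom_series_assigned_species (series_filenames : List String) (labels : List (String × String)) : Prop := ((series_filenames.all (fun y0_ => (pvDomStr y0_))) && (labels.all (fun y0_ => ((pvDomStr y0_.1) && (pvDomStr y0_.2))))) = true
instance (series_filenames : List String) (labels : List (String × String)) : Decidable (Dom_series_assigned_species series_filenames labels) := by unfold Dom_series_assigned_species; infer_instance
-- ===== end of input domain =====

-- B replaces A's set-of-distinct-labels and cardinality test by a single-pass candidate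
-- accumulator with early exit on a second distinct label (objective: simpler).

-- ===== PORT A =====
def series_assigned_species (series_filenames : List String) (labels : List (String × String)) : Option String :=
  if series_filenames.isEmpty then none
  else
    -- seen = {labels.get(fn) for fn in series_filenames}
    let seen : PySem.Set (Option String) :=
      PySem.Set.ofList (series_filenames.map (fun fn => (PySem.Dict.mk labels).get? fn))
    -- seen.discard(None)
    let seen := PySem.Set.discard seen none
    -- len == 1: next(iter(seen)) is its unique element (order-independent on a singleton)
    if PySem.Set.len seen = 1 then (seen.head?).getD none else none

-- ===== PORT B =====
-- the 'for fn in series_filenames' loop with accumulator 'result'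
def pvAltLoop (labels : List (String × String)) : List String → Option String → Option String
  | [], result => result
  | fn :: rest, result =>
    match (PySem.Dict.mk labels).get? fn with
    | none => pvAltLoop labels rest result           -- continue
    | some lbl =>
      match result with
      | none => pvAltLoop labels rest (some lbl)
      | some r => if lbl = r then pvAltLoop labels rest (some r) else none  -- early return None

def series_assigned_species_alt (series_filenames : List String) (labels : List (String × String)) : Option String :=
  pvAltLoop labels series_filenames none

-- ===== PRECONDITION & SPEC =====
def Spec_series_assigned_species (series_filenames : List String) (labels : List (String × String)) (out : Option String) : Prop := out = series_assigned_species_alt series_filenames labels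
instance (series_filenames : List String) (labels : List (String × String)) (out : Option String) : Decidable (Spec_series_assigned_species series_filenames labels out) := by unfold Spec_series_assigned_species; infer_instance

-- ===== CLAIM (what is proved, stated in full; the proofs are below) =====
def Claim_equal_series_assigned_species : Prop := ∀ (series_filenames : List String) (labels : List (String × String)), Dom_series_assigned_species series_filenames labels → Spec_series_assigned_species series_filenames labels (series_assigned_species series_filenames labels)

-- ===== LEMMAS AND PROOFS =====

-- B's loop with an established candidate x returns x iff every later non-None label equals x.
theorem pvAltLoop_some (labels : List (String × String)) (ls : List String) (x : String) :
    pvAltLoop labels ls (some x)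
      = if ∀ y ∈ ls.filterMap (fun fn => (PySem.Dict.mk labels).get? fn), y = x
        then some x else none := by
  induction ls with
  | nil => simp [pvAltLoop]
  | cons fn rest ih =>
    simp only [pvAltLoop]
    cases h : (PySem.Dict.mk labels).get? fn with
    | none =>
      have hcons : (fn :: rest).filterMap (fun fn => (PySem.Dict.mk labels).get? fn)
          = rest.filterMap (fun fn => (PySem.Dict.mk labels).get? fn) := by
        simp [h]
      rw [hcons]; exact ih
    | some lbl =>
      have hcons : (fn :: rest).filterMap (fun fn => (PySem.Dict.mk labels).get? fn)
          = lbl :: rest.filterMap (fun fn => (PySem.Dict.mk labels).get? fn) := by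
        simp [h]
      rw [hcons]
      by_cases hlx : lbl = x
      · subst hlx
        have hiff : (∀ y ∈ lbl :: rest.filterMap (fun fn => (PySem.Dict.mk labels).get? fn), y = lbl)
            ↔ (∀ y ∈ rest.filterMap (fun fn => (PySem.Dict.mk labels).get? fn), y = lbl) := by
          simp
        simp only [hiff]
        exact ih
      · simp [hlx]

-- B's loop from the initial None state, characterised by the non-None labels in order.
theorem pvAltLoop_none (labels : List (String × String)) (ls : List String) :
    pvAltLoop labels ls none
      = match ls.filterMap (fun fn => (PySem.Dict.mk labels).get? fn) with
        | [] => none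
        | y :: rest => if ∀ z ∈ rest, z = y then some y else none := by
  induction ls with
  | nil => simp [pvAltLoop]
  | cons fn rest ih =>
    simp only [pvAltLoop]
    cases h : (PySem.Dict.mk labels).get? fn with
    | none =>
      have hcons : (fn :: rest).filterMap (fun fn => (PySem.Dict.mk labels).get? fn)
          = rest.filterMap (fun fn => (PySem.Dict.mk labels).get? fn) := by
        simp [h]
      rw [hcons]; exact ih
    | some lbl =>
      have hcons : (fn :: rest).filterMap (fun fn => (PySem.Dict.mk labels).get? fn)
          = lbl :: rest.filterMap (fun fn => (PySem.Dict.mk labels).get? fn) := by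
        simp [h]
      rw [hcons]
      simp [pvAltLoop_some]

-- membership in A's set 'seen' after the discard
theorem pvMemSeen (labels : List (String × String)) (sf : List String) (o : Option String) :
    o ∈ PySem.Set.discard
          (PySem.Set.ofList (sf.map (fun fn => (PySem.Dict.mk labels).get? fn))) none
      ↔ (o ≠ none ∧ o ∈ sf.map (fun fn => (PySem.Dict.mk labels).get? fn)) := by
  cases o <;> simp [PySem.Set.discard, List.mem_filter, PySem.Set.mem_ofList]

-- some x is among the looked-up labels iff x is among the non-None labels
theorem pvMemM (labels : List (String × String)) (sf : List String) (x : String) :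
    some x ∈ sf.map (fun fn => (PySem.Dict.mk labels).get? fn)
      ↔ x ∈ sf.filterMap (fun fn => (PySem.Dict.mk labels).get? fn) := by
  simp [List.mem_filterMap, List.mem_map]

-- a nonempty Nodup list all of whose elements equal a is [a]
theorem pvEqSingleton {α : Type} (l : List α) (a : α) (hn : l.Nodup) (ha : a ∈ l)
    (hall : ∀ x ∈ l, x = a) : l = [a] := by
  cases l with
  | nil => cases ha
  | cons b t =>
    have hb : b = a := hall b (by simp)
    subst hb
    cases t with
    | nil => rfl
    | cons c u =>
      have hc : c = b := hall c (by simp)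
      subst hc
      simp at hn

theorem series_assigned_species_eq (sf : List String) (labels : List (String × String)) :
    series_assigned_species sf labels = series_assigned_species_alt sf labels := by
  by_cases hemp : sf = []
  · subst hemp; simp [series_assigned_species, series_assigned_species_alt, pvAltLoop]
  · rw [series_assigned_species, if_neg (by simpa [List.isEmpty_iff] using hemp),
        series_assigned_species_alt, pvAltLoop_none]
    have hnodup : (PySem.Set.discard
        (PySem.Set.ofList (sf.map (fun fn => (PySem.Dict.mk labels).get? fn))) none).Nodup :=
      (PySem.Set.nodup_ofList _).filter _
    cases hM : sf.filterMap (fun fn => (PySem.Dict.mk labels).get? fn) with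
    | nil =>
      -- no non-None label: seen is empty, both sides None
      have hseen : PySem.Set.discard
          (PySem.Set.ofList (sf.map (fun fn => (PySem.Dict.mk labels).get? fn))) none = [] := by
        cases hse : PySem.Set.discard
            (PySem.Set.ofList (sf.map (fun fn => (PySem.Dict.mk labels).get? fn))) none with
        | nil => rfl
        | cons o t =>
          obtain ⟨ho1, ho2⟩ := (pvMemSeen labels sf o).mp (hse ▸ List.mem_cons_self)
          cases o with
          | none => exact absurd rfl ho1
          | some x =>
            have : x ∈ sf.filterMap (fun fn => (PySem.Dict.mk labels).get? fn) :=
              (pvMemM labels sf x).mp ho2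
            rw [hM] at this; cases this
      simp [hseen, PySem.Set.len]
    | cons y rest =>
      have hyL : some y ∈ sf.map (fun fn => (PySem.Dict.mk labels).get? fn) :=
        (pvMemM labels sf y).mpr (by rw [hM]; simp)
      by_cases hall : ∀ z ∈ rest, z = y
      · -- all non-None labels equal y: seen = [some y]
        have hseen : PySem.Set.discard
            (PySem.Set.ofList (sf.map (fun fn => (PySem.Dict.mk labels).get? fn))) none
              = [some y] := by
          apply pvEqSingleton _ _ hnodup
          · exact (pvMemSeen labels sf (some y)).mpr ⟨by simp, hyL⟩
          · intro o ho
            obtain ⟨ho1, ho2⟩ := (pvMemSeen labels sf o).mp ho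
            cases o with
            | none => exact absurd rfl ho1
            | some x =>
              have hx : x ∈ sf.filterMap (fun fn => (PySem.Dict.mk labels).get? fn) :=
                (pvMemM labels sf x).mp ho2
              rw [hM] at hx
              rcases List.mem_cons.mp hx with hx1 | hx2
              · rw [hx1]
              · rw [hall x hx2]
        simp [hseen, PySem.Set.len]
        exact hall
      · -- two distinct non-None labels: seen has at least 2 elements, both sides None
        push Not at hall
        obtain ⟨z, hz, hzy⟩ := hall
        have hzL : some z ∈ sf.map (fun fn => (PySem.Dict.mk labels).get? fn) :=
          (pvMemM labels sf z).mpr (by rw [hM]; simp [hz])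
        have hlen : ¬ PySem.Set.len (PySem.Set.discard
            (PySem.Set.ofList (sf.map (fun fn => (PySem.Dict.mk labels).get? fn))) none) = 1 := by
          intro h1
          have h1' : (PySem.Set.discard (PySem.Set.ofList
              (sf.map (fun fn => (PySem.Dict.mk labels).get? fn))) none).length = 1 := by
            simpa [PySem.Set.len] using h1
          obtain ⟨o, hseo⟩ := List.length_eq_one_iff.mp h1'
          have h1m := (pvMemSeen labels sf (some y)).mpr ⟨by simp, hyL⟩
          have h2m := (pvMemSeen labels sf (some z)).mpr ⟨by simp, hzL⟩
          rw [hseo] at h1m h2m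
          simp at h1m h2m
          injection h1m.trans h2m.symm with hh
          exact hzy hh.symm
        rw [if_neg hlen]
        have hnall : ¬ ∀ w ∈ rest, w = y := fun h => hzy (h z hz)
        simp [hnall]

-- ===== VERDICT (by name: the statement is the Claim_ definition above) =====
theorem series_assigned_species_spec : Claim_equal_series_assigned_species := by
  intro sf labels _
  unfold Spec_series_assigned_species
  exact series_assigned_species_eq sf labels
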